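-- pv_equiv track=rewrite | github.com/OuXianHao/MEM_MOE | hotpot_param_mem/prompts.py | _format_prev_queries
-- ===== SOURCE A (Python) =====
-- from typing import List, Tuple
--
-- def _format_prev_queries(history: List[Tuple[str, str]], keep_last: int = 8) -> str:
--     prev_queries: List[str] = []
--     for q, _ in history:
--         q = (q or "").strip()
--         if q and (not prev_queries or q != prev_queries[-1]):
--             prev_queries.append(q)
--     prev_queries = prev_queries[-keep_last:]
--     return "\n".join(prev_queries) if prev_queries else "(none)"
-- ===== SOURCE B (Python) =====
-- from typing import List, Tuple
--
-- def _format_prev_queries(history: List[Tuple[str, str]], keep_last: int = 8) -> str: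
--     # Walk the history backwards, collecting the most recent distinct
--     # (consecutively deduplicated) non-empty queries until we have keep_last
--     # of them, then print them oldest-first.
--     rev: List[str] = []
--     for q, _ in reversed(history):
--         q = (q or "").strip()
--         if q and (not rev or q != rev[-1]):
--             rev.append(q)
--             if len(rev) == keep_last:
--                 break
--     return "\n".join(reversed(rev)) if rev else "(none)"
-- ===== Notes on version B (the rewrite author's own statement) =====
-- stated objective: alternative
-- what changed: Replaces the forward fold-then-negative-slice (dedup the whole history, then take the last keep_last entries) by a single backward scan that collects at most keep_last run representatives and stops early; Pre_ excludes negative keep_last, where A's [-keep_last:] slice accidentally drops leading items instead of limiting the count.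
-- outside the precondition, e.g. on _format_prev_queries([('a', ''), ('b', '')], -1): A returns 'b', B returns 'a\nb'
import Mathlib
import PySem

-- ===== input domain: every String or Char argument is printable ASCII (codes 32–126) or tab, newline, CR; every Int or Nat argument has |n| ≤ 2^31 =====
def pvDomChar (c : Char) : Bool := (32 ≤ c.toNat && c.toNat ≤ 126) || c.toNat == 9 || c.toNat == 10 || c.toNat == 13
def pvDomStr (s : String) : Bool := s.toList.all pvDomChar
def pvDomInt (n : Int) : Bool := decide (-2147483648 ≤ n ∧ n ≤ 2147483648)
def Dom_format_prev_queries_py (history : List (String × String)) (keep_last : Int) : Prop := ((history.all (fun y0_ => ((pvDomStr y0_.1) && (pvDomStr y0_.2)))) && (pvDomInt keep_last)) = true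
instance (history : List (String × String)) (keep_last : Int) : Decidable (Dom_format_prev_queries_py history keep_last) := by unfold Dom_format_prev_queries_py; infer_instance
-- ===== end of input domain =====

-- B replaces A's forward dedup-then-slice by a backward scan that stops after
-- collecting keep_last run representatives (objective: alternative; same worst-case cost).

-- ===== PORT A =====
-- forward pass: consecutive dedup of stripped nonempty queries, then prev_queries[-keep_last:]
-- ('q or ""' is the identity on the str type, so '(q or "").strip()' is ported as strip q)
def format_prev_queries_py (history : List (String × String)) (keep_last : Int) : String :=
  let prev := history.foldl (fun acc p =>
    let q := PySem.Str.strip p.1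
    if q ≠ "" ∧ (acc = [] ∨ PySem.List.pyGet? acc (-1) ≠ some q) then acc ++ [q] else acc) []
  let prev := PySem.List.slice prev (some (-keep_last)) none
  if prev ≠ [] then PySem.Str.join "\n" prev else "(none)"

-- ===== PORT B =====
-- the backward-scan loop of Source B, with Python's 'break' as a returning branch
def fpqAltLoop (keep_last : Int) : List (String × String) → List String → List String
  | [], rev => rev
  | p :: rest, rev =>
    let q := PySem.Str.strip p.1
    if q ≠ "" ∧ (rev = [] ∨ PySem.List.pyGet? rev (-1) ≠ some q) then
      let rev' := rev ++ [q]
      if (rev'.length : Int) = keep_last then rev'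
      else fpqAltLoop keep_last rest rev'
    else fpqAltLoop keep_last rest rev

def format_prev_queries_py_alt (history : List (String × String)) (keep_last : Int) : String :=
  let rev := fpqAltLoop keep_last history.reverse []
  if rev ≠ [] then PySem.Str.join "\n" rev.reverse else "(none)"

-- ===== PRECONDITION & SPEC =====
-- Pre_ restricts keep_last to the natural domain of a count: on negative keep_last
-- (which A still returns on) A's [-keep_last:] slice drops the first -keep_last
-- deduplicated queries, an artefact of Python slicing nobody would specify.
def Pre_format_prev_queries_py (_history : List (String × String)) (keep_last : Int) : Prop := 0 ≤ keep_last
instance (history : List (String × String)) (keep_last : Int) : Decidable (Pre_format_prev_queries_py history keep_last) := by unfold Pre_format_prev_queries_py; infer_instance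
def pvWitness_format_prev_queries_py : (List (String × String)) × Int := ([("alpha", "x"), ("beta", "y")], 8)

def Spec_format_prev_queries_py (history : List (String × String)) (keep_last : Int) (out : String) : Prop := out = format_prev_queries_py_alt history keep_last
instance (history : List (String × String)) (keep_last : Int) (out : String) : Decidable (Spec_format_prev_queries_py history keep_last out) := by unfold Spec_format_prev_queries_py; infer_instance

-- ===== CLAIM (what is proved, stated in full; the proofs are below) =====
def Claim_equal_format_prev_queries_py : Prop := ∀ (history : List (String × String)) (keep_last : Int), Dom_format_prev_queries_py history keep_last → Pre_format_prev_queries_py history keep_last → Spec_format_prev_queries_py history keep_last (format_prev_queries_py history keep_last)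

-- ===== LEMMAS AND PROOFS =====

-- pure consecutive dedup against an optional "last kept" value
def fpqDD (last? : Option String) : List String → List String
  | [] => []
  | q :: rest => if some q = last? then fpqDD last? rest else q :: fpqDD (some q) rest

-- the stripped, nonempty query sequence
def fpqQS (history : List (String × String)) : List String :=
  (history.map (fun p => PySem.Str.strip p.1)).filter (· ≠ "")

theorem fpqPyGet_neg_one (xs : List String) : PySem.List.pyGet? xs (-1) = xs.getLast? := by
  rcases List.eq_nil_or_concat xs with h | ⟨ys, y, h⟩ <;> subst h
  · rfl
  · rw [List.concat_eq_append, List.getLast?_concat]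
    simp [PySem.List.pyGet?, PySem.List.pyIdx?]

theorem fpqGetLast_cons (a : String) (l : List String) :
    (a :: l).getLast? = l.getLast?.or (some a) := by
  cases l with
  | nil => rfl
  | cons b t => rw [List.getLast?_cons_cons]; simp [List.getLast?_cons]

theorem fpqA_foldl (l : List (String × String)) (acc : List String) :
    l.foldl (fun acc p =>
      let q := PySem.Str.strip p.1
      if q ≠ "" ∧ (acc = [] ∨ PySem.List.pyGet? acc (-1) ≠ some q) then acc ++ [q] else acc) acc
    = acc ++ fpqDD acc.getLast? (fpqQS l) := by
  induction l generalizing acc with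
  | nil => simp [fpqQS, fpqDD]
  | cons p rest ih =>
    by_cases hq : PySem.Str.strip p.1 = ""
    · rw [List.foldl_cons, ih]
      simp [hq, fpqQS]
    · by_cases hl : some (PySem.Str.strip p.1) = acc.getLast?
      · have hacc : acc ≠ [] := by rintro rfl; simp at hl
        rw [List.foldl_cons]
        simp only []
        rw [if_neg (by simp [hq, hacc, fpqPyGet_neg_one, hl.symm]), ih]
        simp [fpqQS, hq, fpqDD, hl]
      · rw [List.foldl_cons]
        simp only []
        have hcond : PySem.Str.strip p.1 ≠ "" ∧
            (acc = [] ∨ PySem.List.pyGet? acc (-1) ≠ some (PySem.Str.strip p.1)) := by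
          refine ⟨hq, ?_⟩
          rcases acc with _ | _
          · exact Or.inl rfl
          · exact Or.inr (by rw [fpqPyGet_neg_one]; exact fun h => hl h.symm)
        rw [if_pos hcond, ih, List.getLast?_concat]
        simp [fpqQS, hq, fpqDD, hl]

theorem fpqB_loop (keep_last : Int) (l : List (String × String)) (rev : List String)
    (hlen : 0 < keep_last → (rev.length : Int) < keep_last) :
    fpqAltLoop keep_last l rev
    = rev ++ (if 0 < keep_last
        then (fpqDD rev.getLast? (fpqQS l)).take (keep_last.toNat - rev.length)
        else fpqDD rev.getLast? (fpqQS l)) := by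
  induction l generalizing rev with
  | nil => simp [fpqAltLoop, fpqQS, fpqDD]
  | cons p rest ih =>
    by_cases hq : PySem.Str.strip p.1 = ""
    · rw [fpqAltLoop]
      simp only []
      rw [if_neg (by simp [hq]), ih rev hlen]
      simp [fpqQS, hq]
    · by_cases hl : some (PySem.Str.strip p.1) = rev.getLast?
      · have hrev : rev ≠ [] := by rintro rfl; simp at hl
        rw [fpqAltLoop]
        simp only []
        rw [if_neg (by
          rintro ⟨-, h | h⟩
          · exact hrev h
          · exact h (by rw [fpqPyGet_neg_one]; exact hl.symm)), ih rev hlen]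
        simp [fpqQS, hq, fpqDD, hl]
      · have hcnd : PySem.Str.strip p.1 ≠ "" ∧
            (rev = [] ∨ PySem.List.pyGet? rev (-1) ≠ some (PySem.Str.strip p.1)) := by
          refine ⟨hq, ?_⟩
          rcases rev with _ | _
          · exact Or.inl rfl
          · exact Or.inr (by rw [fpqPyGet_neg_one]; exact fun h => hl h.symm)
        rw [fpqAltLoop]
        simp only []
        rw [if_pos hcnd]
        have hdd : fpqDD rev.getLast? (fpqQS (p :: rest))
            = PySem.Str.strip p.1 :: fpqDD (some (PySem.Str.strip p.1)) (fpqQS rest) := by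
          simp [fpqQS, hq, fpqDD, hl]
        by_cases hbr : ((rev ++ [PySem.Str.strip p.1]).length : Int) = keep_last
        · have hk : 0 < keep_last := by
            rw [← hbr]; simp only [List.length_append, List.length_cons, List.length_nil]
            push_cast; omega
          rw [if_pos hbr, if_pos hk, hdd]
          have h1 : keep_last.toNat - rev.length = 1 := by
            simp only [List.length_append, List.length_cons, List.length_nil] at hbr
            omega
          simp [h1]
        · rw [if_neg hbr]
          have hlen' : 0 < keep_last → (((rev ++ [PySem.Str.strip p.1]).length : Int)) < keep_last := by
            intro hk
            have h1 := hlen hk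
            simp only [List.length_append, List.length_cons, List.length_nil] at hbr ⊢
            push_cast at hbr ⊢
            omega
          rw [ih _ hlen', List.getLast?_concat, hdd]
          by_cases hk : 0 < keep_last
          · rw [if_pos hk, if_pos hk]
            have h1 : keep_last.toNat - rev.length
                = (keep_last.toNat - (rev ++ [PySem.Str.strip p.1]).length) + 1 := by
              have := hlen hk
              simp only [List.length_append, List.length_cons, List.length_nil]
              omega
            rw [h1]
            simp [List.take_succ_cons]
          · simp [hk]

-- scanning one more element appended at the end
theorem fpqDD_append (qs : List String) (last? : Option String) (q : String) :
    fpqDD last? (qs ++ [q])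
    = if some q = ((fpqDD last? qs).getLast?).or last? then fpqDD last? qs
      else fpqDD last? qs ++ [q] := by
  induction qs generalizing last? with
  | nil => simp [fpqDD]
  | cons q0 rest ih =>
    by_cases h0 : some q0 = last?
    · rw [List.cons_append, fpqDD, if_pos h0, ih last?, fpqDD, if_pos h0]
    · rw [List.cons_append, fpqDD, if_neg h0, ih (some q0), fpqDD, if_neg h0]
      rw [show (q0 :: fpqDD (some q0) rest).getLast?.or last?
            = ((fpqDD (some q0) rest).getLast?).or (some q0) by
          rw [fpqGetLast_cons]; cases (fpqDD (some q0) rest).getLast? <;> simp]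
      split_ifs <;> simp

-- consecutive dedup is symmetric under reversal
theorem fpqDD_reverse (qs : List String) :
    fpqDD none qs.reverse = (fpqDD none qs).reverse := by
  induction qs with
  | nil => rfl
  | cons q rest ih =>
    rw [List.reverse_cons, fpqDD_append, ih]
    rcases hr : rest with _ | ⟨q1, rest'⟩
    · simp [fpqDD]
    · rw [hr] at ih
      have hdd1 : fpqDD none (q1 :: rest') = q1 :: fpqDD (some q1) rest' := by
        rw [fpqDD]; simp
      by_cases h1 : q = q1
      · subst h1
        rw [hdd1, if_pos (by rw [List.getLast?_reverse]; simp)]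
        rw [show fpqDD none (q :: q :: rest') = q :: fpqDD (some q) rest' by
          rw [fpqDD, if_neg (by simp), fpqDD, if_pos rfl]]
      · have hc : ¬ some q = ((q1 :: fpqDD (some q1) rest').reverse.getLast?).or none := by
          rw [List.getLast?_reverse]
          simp only [List.head?_cons]
          exact fun h => h1 (by simpa using h)
        rw [hdd1, if_neg hc]
        rw [show fpqDD none (q :: q1 :: rest') = q :: q1 :: fpqDD (some q1) rest' by
          rw [fpqDD, if_neg (by simp), fpqDD,
            if_neg (fun h => h1 (Option.some.inj h).symm)]]
        simp

theorem fpqQS_reverse (history : List (String × String)) :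
    fpqQS history.reverse = (fpqQS history).reverse := by
  simp [fpqQS, List.filter_reverse]

-- ===== VERDICT (by name: the statement is the Claim_ definition above) =====

theorem format_prev_queries_py_spec : Claim_equal_format_prev_queries_py := by
  intro history keep_last _ hpre
  unfold Spec_format_prev_queries_py format_prev_queries_py format_prev_queries_py_alt
  rw [fpqA_foldl history [],
    fpqB_loop keep_last history.reverse [] (by intro hk; simpa using hk)]
  simp only [List.nil_append, List.getLast?_nil, List.length_nil, Nat.sub_zero]
  rw [fpqQS_reverse, fpqDD_reverse]
  by_cases hk : 0 < keep_last
  · rw [if_pos hk]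
    obtain ⟨k, rfl, hkpos⟩ : ∃ k : ℕ, keep_last = (k : Int) ∧ 0 < k :=
      ⟨keep_last.toNat, by omega, by omega⟩
    rw [PySem.List.slice_from_neg_natCast _ k hkpos, List.take_reverse, List.reverse_reverse]
    simp
  · have hk0 : keep_last = 0 := by unfold Pre_format_prev_queries_py at hpre; omega
    subst hk0
    rw [if_neg hk, List.reverse_reverse]
    simp [PySem.List.slice]
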